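-- pv_equiv track=rewrite | github.com/yvrob/FHR | untitled1.py | fcc_sites
-- ===== SOURCE A (Python) =====
-- from math import sqrt, ceil, floor
--
-- def fcc_sites(dsqr):
--     #"""Generates integer FCC lattice sites at distance sqrt(dsqr) from origin.
--     #   Use even dsqr.""""
--
--     # There are no sites at odd dsqr.
--     if int(dsqr) % 2 == 1:
--         return
--
--     xmax = int(ceil(sqrt(dsqr)))
--
--     # x loops from 0 to xmax, inclusive:
--     for x in range(xmax+1):
--         try:
--             ymax = int(ceil(sqrt(dsqr - x*x)))
--         except:
--             ymax = -1
--
--         for y in range(ymax + 1):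
--             try:
--                 ztmp = sqrt(dsqr - x*x - y*y)
--             except:
--                 ztmp = 0
--
--             zmax = int(ceil(ztmp))
--             zmin = int(floor(ztmp))
--             zz = dsqr - x*x - y*y
--             for z in range(zmin, zmax+1):
--                 if zz == z*z and (x + y + z) % 2 == 0:
--                     if x == 0 and y == 0 and z == 0:
--                         yield((0, 0, 0))
--                     elif x == 0 and y == 0:
--                         yield((0, 0, z))
--                         yield((0, 0, -z))
--                     elif x == 0 and z == 0:
--                         yield((0, y, 0))
--                         yield((0, -y, 0))
--                     elif y == 0 and z == 0:
--                         yield((x, 0, 0))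
--                         yield((-x, 0, 0))
--                     elif x == 0:
--                         yield((0, y, z))
--                         yield((0, -y, z))
--                         yield((0, y, -z))
--                         yield((0, -y, -z))
--                     elif y == 0:
--                         yield((x, 0, z))
--                         yield((-x, 0, z))
--                         yield((x, 0, -z))
--                         yield((-x, 0, -z))
--                     elif z == 0:
--                         yield((x, y, 0))
--                         yield((-x, y, 0))
--                         yield((x, -y, 0))
--                         yield((-x, -y, 0))
--                     else:
--                         yield((x, y, z))
--                         yield((-x, y, z))
--                         yield((x, -y, z))
--                         yield((-x, -y, z))
--                         yield((x, y, -z))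
--                         yield((-x, y, -z))
--                         yield((x, -y, -z))
--                         yield((-x, -y, -z))
-- ===== SOURCE B (Python) =====
-- from math import isqrt
--
-- def fcc_sites(dsqr):
--     # Two-pointer sum-of-two-squares sweep per x instead of A's per-y
--     # float-sqrt perfect-square scan, and sign-list products instead of the
--     # eight-way cascade.
--     if int(dsqr) % 2 == 1:
--         return
--     for x in range(isqrt(dsqr) + 1):
--         r = dsqr - x * x
--         lo, hi = 0, isqrt(r)
--         small, large = [], []
--         while lo <= hi:
--             s = lo * lo + hi * hi
--             if s < r:
--                 lo += 1
--             elif s > r: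
--                 hi -= 1
--             else:
--                 small.append((lo, hi))
--                 if lo != hi:
--                     large.append((hi, lo))
--                 lo += 1
--                 hi -= 1
--         for (y, z) in small + large[::-1]:
--             if (x + y + z) % 2 == 0:
--                 for sz in ([1, -1] if z else [1]):
--                     for sy in ([1, -1] if y else [1]):
--                         for sx in ([1, -1] if x else [1]):
--                             yield (sx * x, sy * y, sz * z)
-- ===== Notes on version B (the rewrite author's own statement) =====
-- stated objective: faster
-- what changed: Per x, replaces A's y-scan with a float-sqrt perfect-square test for every y by a classic two-pointer sum-of-two-squares sweep (lo up, hi down) collecting the y<=z solutions and their mirrors, then emits signs via a product of sign lists instead of the eight-way cascade.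
import Mathlib
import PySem

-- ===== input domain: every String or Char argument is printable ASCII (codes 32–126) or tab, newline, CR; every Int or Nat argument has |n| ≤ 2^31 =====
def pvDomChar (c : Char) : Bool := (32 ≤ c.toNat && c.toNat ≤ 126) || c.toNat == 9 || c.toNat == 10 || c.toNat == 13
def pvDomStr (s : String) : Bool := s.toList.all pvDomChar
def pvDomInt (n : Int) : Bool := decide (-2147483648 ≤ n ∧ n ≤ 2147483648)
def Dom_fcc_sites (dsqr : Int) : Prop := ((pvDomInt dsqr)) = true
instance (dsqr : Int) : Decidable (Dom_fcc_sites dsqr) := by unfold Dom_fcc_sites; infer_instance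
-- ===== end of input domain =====

-- B replaces A's per-y float-sqrt perfect-square scan by a two-pointer
-- sum-of-two-squares sweep per x (with sign-list products instead of the
-- eight-way cascade); measured constant-factor faster; identical output lists.

-- ===== PORT A =====
-- A-side helper: int(ceil(sqrt(n))) for 0 ≤ n; exact for the |n| ≤ 2^31 domain,
-- where math.sqrt is accurate enough that ceil(sqrt(n)) is the true integer ceiling.
def pvCeilSqrt (n : Int) : Int :=
  if Int.sqrt n * Int.sqrt n = n then Int.sqrt n else Int.sqrt n + 1

-- A-side helper: the eight-way if/elif yield cascade for one candidate (x, y, z).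
def pvYields (x y z : Int) : List (Int × Int × Int) :=
  if x = 0 ∧ y = 0 ∧ z = 0 then [((0:Int), (0:Int), (0:Int))]
  else if x = 0 ∧ y = 0 then [(0, 0, z), (0, 0, -z)]
  else if x = 0 ∧ z = 0 then [(0, y, 0), (0, -y, 0)]
  else if y = 0 ∧ z = 0 then [(x, 0, 0), (-x, 0, 0)]
  else if x = 0 then [(0, y, z), (0, -y, z), (0, y, -z), (0, -y, -z)]
  else if y = 0 then [(x, 0, z), (-x, 0, z), (x, 0, -z), (-x, 0, -z)]
  else if z = 0 then [(x, y, 0), (-x, y, 0), (x, -y, 0), (-x, -y, 0)]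
  else [(x, y, z), (-x, y, z), (x, -y, z), (-x, -y, z),
        (x, y, -z), (-x, y, -z), (x, -y, -z), (-x, -y, -z)]

-- Port of A. For even dsqr < 0 Python's math.sqrt raises ValueError: that input is
-- excluded by Pre_fcc_sites (the '[]' guard only makes the port total there).
def fcc_sites (dsqr : Int) : List (Int × Int × Int) :=
  if PySem.Int.mod dsqr 2 = 1 then []
  else if dsqr < 0 then []
  else
    let xmax := pvCeilSqrt dsqr
    (PySem.List.pyRange 0 (xmax + 1) 1).foldl (fun acc x =>
      -- try/except: sqrt raises exactly when dsqr - x*x < 0, then ymax = -1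
      let ymax := if dsqr - x * x < 0 then -1 else pvCeilSqrt (dsqr - x * x)
      acc ++ (PySem.List.pyRange 0 (ymax + 1) 1).foldl (fun acc2 y =>
        let zz := dsqr - x * x - y * y
        -- try/except: ztmp = sqrt(zz) or 0 when zz < 0; zmax = ceil(ztmp), zmin = floor(ztmp)
        let zmax := if zz < 0 then 0 else pvCeilSqrt zz
        let zmin := if zz < 0 then 0 else Int.sqrt zz
        acc2 ++ (PySem.List.pyRange zmin (zmax + 1) 1).foldl (fun acc3 z =>
          if zz = z * z ∧ PySem.Int.mod (x + y + z) 2 = 0 then acc3 ++ pvYields x y z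
          else acc3) []) []) []

-- ===== PORT B =====
-- B-side helper: the two-pointer while loop collecting (lo,hi) solutions of
-- lo² + hi² = r into `small` and their mirrors (hi,lo) into `large`.
def pvTwoSq (r lo hi : Int) (small large : List (Int × Int)) :
    List (Int × Int) × List (Int × Int) :=
  if _h : lo ≤ hi then
    if lo * lo + hi * hi < r then pvTwoSq r (lo + 1) hi small large
    else if r < lo * lo + hi * hi then pvTwoSq r lo (hi - 1) small large
    else pvTwoSq r (lo + 1) (hi - 1) (small ++ [(lo, hi)])
           (if lo = hi then large else large ++ [(hi, lo)])
  else (small, large)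
termination_by (hi + 1 - lo).toNat
decreasing_by all_goals omega

-- B-side helper: '[1, -1] if v else [1]'
def pvSigns (v : Int) : List Int := if v ≠ 0 then [1, -1] else [1]

-- B-side helper: the three nested sign loops 'for sz: for sy: for sx: yield'.
def pvEmit (x y z : Int) : List (Int × Int × Int) :=
  (pvSigns z).foldl (fun a3 sz =>
    a3 ++ (pvSigns y).foldl (fun a4 sy =>
      a4 ++ (pvSigns x).foldl (fun a5 sx => a5 ++ [(sx * x, sy * y, sz * z)]) []) []) []

-- Port of B. For even dsqr < 0 Python's math.isqrt raises ValueError: excluded by Pre_fcc_sites.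
def fcc_sites_alt (dsqr : Int) : List (Int × Int × Int) :=
  if PySem.Int.mod dsqr 2 = 1 then []
  else if dsqr < 0 then []
  else
    (PySem.List.pyRange 0 (Int.sqrt dsqr + 1) 1).foldl (fun acc x =>
      let r := dsqr - x * x
      let sl := pvTwoSq r 0 (Int.sqrt r) [] []
      acc ++ (sl.1 ++ sl.2.reverse).foldl (fun acc2 p =>
        if PySem.Int.mod (x + p.1 + p.2) 2 = 0 then acc2 ++ pvEmit x p.1 p.2
        else acc2) []) []

-- ===== PRECONDITION & SPEC =====
-- Pre_ excludes exactly the even negative dsqr, on which A raises ValueError (math.sqrt of a negative).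
def Pre_fcc_sites (dsqr : Int) : Prop := PySem.Int.mod dsqr 2 = 1 ∨ 0 ≤ dsqr
instance (dsqr : Int) : Decidable (Pre_fcc_sites dsqr) := by unfold Pre_fcc_sites; infer_instance
def pvWitness_fcc_sites : Int := (4)
def Spec_fcc_sites (dsqr : Int) (out : List (Int × Int × Int)) : Prop := out = fcc_sites_alt dsqr
instance (dsqr : Int) (out : List (Int × Int × Int)) : Decidable (Spec_fcc_sites dsqr out) := by unfold Spec_fcc_sites; infer_instance

-- ===== CLAIM (what is proved, stated in full; the proofs are below) =====
def Claim_equal_fcc_sites : Prop := ∀ (dsqr : Int), Dom_fcc_sites dsqr → Pre_fcc_sites dsqr → Spec_fcc_sites dsqr (fcc_sites dsqr)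

-- ===== LEMMAS AND PROOFS =====

theorem pvSqrtLe (n : Int) (h : 0 ≤ n) : Int.sqrt n * Int.sqrt n ≤ n := by
  have h1 := Nat.sqrt_le' n.toNat
  rw [pow_two] at h1
  have h2 : ((n.toNat.sqrt * n.toNat.sqrt : Nat) : Int) ≤ ((n.toNat : Nat) : Int) := by
    exact_mod_cast h1
  unfold Int.sqrt; push_cast at h2 ⊢; omega

theorem pvLtSuccSqrt (n : Int) (h : 0 ≤ n) : n < (Int.sqrt n + 1) * (Int.sqrt n + 1) := by
  have h1 := Nat.lt_succ_sqrt' n.toNat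
  rw [pow_two] at h1
  have h2 : ((n.toNat : Nat) : Int) < ((n.toNat.sqrt.succ * n.toNat.sqrt.succ : Nat) : Int) := by
    exact_mod_cast h1
  unfold Int.sqrt; push_cast at h2 ⊢; omega

-- a ≤ √r whenever a² ≤ r (a, r ≥ 0)
theorem pvLeSqrt (a r : Int) (ha : 0 ≤ a) (h : a * a ≤ r) : a ≤ Int.sqrt r := by
  by_contra hc
  have h2 := pvLtSuccSqrt r (le_trans (mul_self_nonneg a) h)
  have h0 := Int.sqrt_nonneg r
  nlinarith

-- √(a²) = a for 0 ≤ a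
theorem pvSqrtSq (a : Int) (ha : 0 ≤ a) : Int.sqrt (a * a) = a := by
  rw [Int.sqrt_eq]
  omega

-- the sign-list product produces exactly A's cascade
theorem pvEmit_eq_pvYields (x y z : Int) : pvEmit x y z = pvYields x y z := by
  by_cases hx : x = 0 <;> by_cases hy : y = 0 <;> by_cases hz : z = 0 <;>
    simp [pvEmit, pvSigns, pvYields, hx, hy, hz, List.foldl]

-- loop shape: 'if p(v): out.extend(g(v))' as a flatMap
theorem pv_foldl_ite_append {a : Type} {b : Type} (l : List a) (p : a → Prop) [DecidablePred p]
    (g : a → List b) (acc : List b) :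
    l.foldl (fun ac v => if p v then ac ++ g v else ac) acc =
      acc ++ l.flatMap (fun v => if p v then g v else []) := by
  induction l generalizing acc with
  | nil => simp
  | cons hd tl ih =>
    simp only [List.foldl_cons, List.flatMap_cons]
    by_cases hp : p hd
    · simp [hp, ih]
    · simp [hp, ih]

-- flatMap over a filterMap
theorem pv_flatMap_filterMap {a b c : Type} (l : List a) (g : a → Option b) (F : b → List c) :
    (l.filterMap g).flatMap F = l.flatMap (fun v => ((g v).map F).getD []) := by
  induction l with
  | nil => rfl
  | cons hd tl ih =>
    cases hg : g hd <;> simp [hg, ih]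

-- A's inner z-loop in closed form (zz = dsqr - x² - y² ≥ 0 on the admitted range)
theorem pvZfold (x y zz : Int) (hzz : 0 ≤ zz) :
    (PySem.List.pyRange (Int.sqrt zz) (pvCeilSqrt zz + 1) 1).foldl
      (fun acc3 z => if zz = z * z ∧ PySem.Int.mod (x + y + z) 2 = 0 then acc3 ++ pvYields x y z
        else acc3) []
    = if zz = Int.sqrt zz * Int.sqrt zz ∧ PySem.Int.mod (x + y + Int.sqrt zz) 2 = 0 then
        pvYields x y (Int.sqrt zz) else [] := by
  have hq := pvSqrtLe zz hzz
  have hq2 := pvLtSuccSqrt zz hzz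
  have hq0 := Int.sqrt_nonneg zz
  by_cases hsq : Int.sqrt zz * Int.sqrt zz = zz
  · have hceq : pvCeilSqrt zz = Int.sqrt zz := by unfold pvCeilSqrt; simp [hsq]
    rw [hceq, PySem.List.pyRange_one_cons (by omega), PySem.List.pyRange_one_eq_nil (by omega)]
    simp only [List.foldl]
    split_ifs with h1 <;> simp
  · have hceq : pvCeilSqrt zz = Int.sqrt zz + 1 := by unfold pvCeilSqrt; simp [hsq]
    rw [hceq, PySem.List.pyRange_one_cons (by omega), PySem.List.pyRange_one_cons (by omega),
      PySem.List.pyRange_one_eq_nil (by omega)]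
    simp only [List.foldl]
    have hc1 : ¬ (zz = Int.sqrt zz * Int.sqrt zz ∧ PySem.Int.mod (x + y + Int.sqrt zz) 2 = 0) := by
      rintro ⟨h0, -⟩; exact hsq h0.symm
    have hc2 : ¬ (zz = (Int.sqrt zz + 1) * (Int.sqrt zz + 1) ∧
        PySem.Int.mod (x + y + (Int.sqrt zz + 1)) 2 = 0) := by
      rintro ⟨h0, -⟩; exact (ne_of_lt hq2) h0
    rw [if_neg hc1, if_neg hc2, if_neg hc1]

-- the pair lists the proofs reason about -------------------------------------

-- all (y, z) with y² + z² = r, 0 ≤ y, 0 ≤ z, in increasing-y order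
def pvGA (r y : Int) : Option (Int × Int) :=
  let z := Int.sqrt (r - y * y)
  if r - y * y = z * z then some (y, z) else none

def pvAll (r : Int) : List (Int × Int) :=
  (PySem.List.pyRange 0 (Int.sqrt r + 1) 1).filterMap (pvGA r)

-- the y ≤ z solutions with z ≤ hi, for y from lo up
def pvGS (r hi y : Int) : Option (Int × Int) :=
  let z := Int.sqrt (r - y * y)
  if r - y * y = z * z ∧ y ≤ z ∧ z ≤ hi then some (y, z) else none

def pvSS (r lo hi : Int) : List (Int × Int) :=
  (PySem.List.pyRange lo (hi + 1) 1).filterMap (pvGS r hi)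

def pvMir (p : Int × Int) : Option (Int × Int) :=
  if p.1 = p.2 then none else some (p.2, p.1)

def pvMM (r lo hi : Int) : List (Int × Int) := (pvSS r lo hi).filterMap pvMir

theorem pvSS_nil (r lo hi : Int) (h : hi < lo) : pvSS r lo hi = [] := by
  unfold pvSS
  rw [PySem.List.pyRange_one_eq_nil (by omega)]
  rfl

-- step lemmas for the two-pointer invariant
theorem pvSS_lo (r lo hi : Int) (hlo : 0 ≤ lo) (hle : lo ≤ hi) (hlt : lo * lo + hi * hi < r) :
    pvSS r lo hi = pvSS r (lo + 1) hi := by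
  unfold pvSS
  rw [PySem.List.pyRange_one_cons (by omega), List.filterMap_cons]
  have : pvGS r hi lo = none := by
    unfold pvGS
    simp only
    rw [if_neg]
    rintro ⟨h1, h2, h3⟩
    have hz0 : 0 ≤ Int.sqrt (r - lo * lo) := Int.sqrt_nonneg _
    nlinarith
  rw [this]

theorem pvSS_hi (r lo hi : Int) (hlo : 0 ≤ lo) (hle : lo ≤ hi) (hgt : r < lo * lo + hi * hi) :
    pvSS r lo hi = pvSS r lo (hi - 1) := by
  unfold pvSS
  rw [PySem.List.pyRange_one_succ_right (by omega), List.filterMap_append]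
  have hlast : (List.filterMap (pvGS r hi) [hi]) = [] := by
    simp only [List.filterMap_cons, List.filterMap_nil]
    have : pvGS r hi hi = none := by
      unfold pvGS
      simp only
      rw [if_neg]
      rintro ⟨h1, h2, h3⟩
      have hz : Int.sqrt (r - hi * hi) = hi := le_antisymm h3 h2
      nlinarith [hz ▸ h1]
    rw [this]
  rw [hlast, List.append_nil]
  have hr : hi - 1 + 1 = hi := by omega
  rw [hr]
  apply List.filterMap_congr
  intro y hy
  rw [PySem.List.mem_pyRange_one] at hy
  unfold pvGS
  simp only
  by_cases hc : r - y * y = Int.sqrt (r - y * y) * Int.sqrt (r - y * y) ∧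
      y ≤ Int.sqrt (r - y * y)
  · have hz0 : 0 ≤ Int.sqrt (r - y * y) := Int.sqrt_nonneg _
    have hzlt : Int.sqrt (r - y * y) < hi := by nlinarith [hc.1, hy.1, hy.2]
    rw [if_pos ⟨hc.1, hc.2, by omega⟩, if_pos ⟨hc.1, hc.2, by omega⟩]
  · rw [if_neg (by tauto), if_neg (by tauto)]

theorem pvSS_eq (r lo hi : Int) (hlo : 0 ≤ lo) (hle : lo ≤ hi) (heq : lo * lo + hi * hi = r) :
    pvSS r lo hi = (lo, hi) :: pvSS r (lo + 1) (hi - 1) := by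
  unfold pvSS
  rw [PySem.List.pyRange_one_cons (by omega), List.filterMap_cons]
  have hhead : pvGS r hi lo = some (lo, hi) := by
    unfold pvGS
    simp only
    have hz : Int.sqrt (r - lo * lo) = hi := by
      have : r - lo * lo = hi * hi := by omega
      rw [this, pvSqrtSq hi (by omega)]
    rw [hz, if_pos ⟨by omega, hle, le_refl hi⟩]
  simp only [hhead]
  congr 1
  by_cases hlh : lo = hi
  · rw [PySem.List.pyRange_one_eq_nil (by omega), PySem.List.pyRange_one_eq_nil (by omega)]
    rfl
  · have hlt : lo < hi := lt_of_le_of_ne hle hlh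
    rw [PySem.List.pyRange_one_succ_right (by omega), List.filterMap_append]
    have hlast : (List.filterMap (pvGS r hi) [hi]) = [] := by
      simp only [List.filterMap_cons, List.filterMap_nil]
      have : pvGS r hi hi = none := by
        unfold pvGS
        simp only
        rw [if_neg]
        rintro ⟨h1, h2, h3⟩
        have hz : Int.sqrt (r - hi * hi) = hi := le_antisymm h3 h2
        nlinarith [hz ▸ h1]
      rw [this]
    rw [hlast, List.append_nil]
    have hr : hi - 1 + 1 = hi := by omega
    rw [hr]
    apply List.filterMap_congr
    intro y hy
    rw [PySem.List.mem_pyRange_one] at hy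
    unfold pvGS
    simp only
    by_cases hc : r - y * y = Int.sqrt (r - y * y) * Int.sqrt (r - y * y) ∧
        y ≤ Int.sqrt (r - y * y)
    · have hz0 : 0 ≤ Int.sqrt (r - y * y) := Int.sqrt_nonneg _
      have hzlt : Int.sqrt (r - y * y) < hi := by nlinarith [hc.1, hy.1, hy.2]
      rw [if_pos ⟨hc.1, hc.2, by omega⟩, if_pos ⟨hc.1, hc.2, by omega⟩]
    · rw [if_neg (by tauto), if_neg (by tauto)]

-- the two-pointer loop computes pvSS and pvMM
theorem pvTwoSq_spec (r : Int) : ∀ (n : Nat) (lo hi : Int) (s l : List (Int × Int)),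
    (hi + 1 - lo).toNat = n → 0 ≤ lo →
    pvTwoSq r lo hi s l = (s ++ pvSS r lo hi, l ++ pvMM r lo hi) := by
  intro n
  induction n using Nat.strong_induction_on with
  | _ n ih =>
    intro lo hi s l hn hlo
    by_cases h : lo ≤ hi
    · rw [pvTwoSq]
      rw [dif_pos h]
      by_cases h1 : lo * lo + hi * hi < r
      · rw [if_pos h1, ih (hi + 1 - (lo + 1)).toNat (by omega) (lo + 1) hi s l rfl (by omega)]
        rw [pvSS_lo r lo hi hlo h h1]
        unfold pvMM
        rw [pvSS_lo r lo hi hlo h h1]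
      · rw [if_neg h1]
        by_cases h2 : r < lo * lo + hi * hi
        · rw [if_pos h2, ih (hi - 1 + 1 - lo).toNat (by omega) lo (hi - 1) s l rfl hlo]
          rw [pvSS_hi r lo hi hlo h h2]
          unfold pvMM
          rw [pvSS_hi r lo hi hlo h h2]
        · have heq : lo * lo + hi * hi = r := by omega
          rw [if_neg h2, ih (hi - 1 + 1 - (lo + 1)).toNat (by omega) (lo + 1) (hi - 1) _ _ rfl (by omega)]
          rw [pvSS_eq r lo hi hlo h heq]
          unfold pvMM
          rw [pvSS_eq r lo hi hlo h heq, List.filterMap_cons]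
          by_cases hlh : lo = hi
          · rw [if_pos hlh]
            have : pvMir (lo, hi) = none := by unfold pvMir; simp [hlh]
            rw [this]
            simp
          · rw [if_neg hlh]
            have : pvMir (lo, hi) = some (hi, lo) := by unfold pvMir; simp [hlh]
            rw [this]
            simp
    · rw [pvTwoSq]
      rw [dif_neg h, pvSS_nil r lo hi (by omega)]
      unfold pvMM
      rw [pvSS_nil r lo hi (by omega)]
      simp

-- membership characterisations --------------------------------------------

theorem pvAll_mem (r : Int) (_hr : 0 ≤ r) (p : Int × Int) :
    p ∈ pvAll r ↔ 0 ≤ p.1 ∧ 0 ≤ p.2 ∧ p.1 * p.1 + p.2 * p.2 = r := by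
  unfold pvAll
  rw [List.mem_filterMap]
  constructor
  · rintro ⟨y, hy, hg⟩
    rw [PySem.List.mem_pyRange_one] at hy
    unfold pvGA at hg
    simp only at hg
    split_ifs at hg with hc
    · cases hg
      exact ⟨hy.1, Int.sqrt_nonneg _, by dsimp only; omega⟩
  · rintro ⟨h1, h2, h3⟩
    refine ⟨p.1, ?_, ?_⟩
    · rw [PySem.List.mem_pyRange_one]
      have : p.1 ≤ Int.sqrt r := pvLeSqrt p.1 r h1 (by nlinarith)
      omega
    · unfold pvGA
      simp only
      have hz : Int.sqrt (r - p.1 * p.1) = p.2 := by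
        have : r - p.1 * p.1 = p.2 * p.2 := by omega
        rw [this, pvSqrtSq p.2 h2]
      rw [hz, if_pos (by omega)]

theorem pvSS_mem (r : Int) (_hr : 0 ≤ r) (p : Int × Int) :
    p ∈ pvSS r 0 (Int.sqrt r) ↔
      (0 ≤ p.1 ∧ 0 ≤ p.2 ∧ p.1 * p.1 + p.2 * p.2 = r) ∧ p.1 ≤ p.2 := by
  unfold pvSS
  rw [List.mem_filterMap]
  constructor
  · rintro ⟨y, hy, hg⟩
    rw [PySem.List.mem_pyRange_one] at hy
    unfold pvGS at hg
    simp only at hg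
    split_ifs at hg with hc
    · cases hg
      exact ⟨⟨hy.1, Int.sqrt_nonneg _, by dsimp only; omega⟩, hc.2.1⟩
  · rintro ⟨⟨h1, h2, h3⟩, h4⟩
    refine ⟨p.1, ?_, ?_⟩
    · rw [PySem.List.mem_pyRange_one]
      have : p.1 ≤ Int.sqrt r := pvLeSqrt p.1 r h1 (by nlinarith)
      omega
    · unfold pvGS
      simp only
      have hz : Int.sqrt (r - p.1 * p.1) = p.2 := by
        have : r - p.1 * p.1 = p.2 * p.2 := by omega
        rw [this, pvSqrtSq p.2 h2]
      have hzh : p.2 ≤ Int.sqrt r := pvLeSqrt p.2 r h2 (by nlinarith)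
      rw [hz, if_pos ⟨by omega, h4, hzh⟩]

theorem pvMM_mem (r : Int) (hr : 0 ≤ r) (p : Int × Int) :
    p ∈ pvMM r 0 (Int.sqrt r) ↔
      (0 ≤ p.1 ∧ 0 ≤ p.2 ∧ p.1 * p.1 + p.2 * p.2 = r) ∧ p.2 < p.1 := by
  unfold pvMM
  rw [List.mem_filterMap]
  constructor
  · rintro ⟨q, hq, hm⟩
    rw [pvSS_mem r hr] at hq
    unfold pvMir at hm
    split_ifs at hm with hc
    · cases hm
      exact ⟨⟨hq.1.2.1, hq.1.1, by dsimp only; omega⟩, by dsimp only; omega⟩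
  · rintro ⟨⟨h1, h2, h3⟩, h4⟩
    refine ⟨(p.2, p.1), ?_, ?_⟩
    · rw [pvSS_mem r hr]
      exact ⟨⟨h2, h1, by dsimp only; omega⟩, by dsimp only; omega⟩
    · unfold pvMir
      simp only
      rw [if_neg (by omega)]

-- sortedness ----------------------------------------------------------------

-- filterMap with first-component-preserving g keeps the range strictly increasing
theorem pv_pairwise_fst (l : List Int) (g : Int → Option (Int × Int))
    (hg : ∀ y p, g y = some p → p.1 = y) (hl : l.Pairwise (· < ·)) :
    (l.filterMap g).Pairwise (fun p q => p.1 < q.1) := by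
  rw [List.pairwise_filterMap]
  refine hl.imp_of_mem ?_
  intro a b _ _ hab p hp q hq
  rw [hg a p hp, hg b q hq]
  exact hab

theorem pvAll_sorted (r : Int) : (pvAll r).Pairwise (fun p q => p.1 < q.1) := by
  unfold pvAll
  apply pv_pairwise_fst _ _ ?_ (PySem.List.pairwise_lt_pyRange_one 0 (Int.sqrt r + 1))
  intro y p hp
  unfold pvGA at hp
  simp only at hp
  split_ifs at hp
  · cases hp; rfl

theorem pvSS_sorted (r lo hi : Int) : (pvSS r lo hi).Pairwise (fun p q => p.1 < q.1) := by
  unfold pvSS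
  apply pv_pairwise_fst _ _ ?_ (PySem.List.pairwise_lt_pyRange_one lo (hi + 1))
  intro y p hp
  unfold pvGS at hp
  simp only at hp
  split_ifs at hp
  · cases hp; rfl

theorem pvMM_sorted (r : Int) (hr : 0 ≤ r) :
    ((pvMM r 0 (Int.sqrt r)).reverse).Pairwise (fun p q => p.1 < q.1) := by
  rw [List.pairwise_reverse]
  unfold pvMM
  rw [List.pairwise_filterMap]
  refine (pvSS_sorted r 0 (Int.sqrt r)).imp_of_mem ?_
  intro a b ha hb hab p hp q hq
  have hma := (pvSS_mem r hr a).mp ha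
  have hmb := (pvSS_mem r hr b).mp hb
  unfold pvMir at hp hq
  split_ifs at hp hq
  · cases hp; cases hq
    simp only
    -- b.2 < a.2 since a.1 < b.1 and a.1² + a.2² = b.1² + b.2² = r with all ≥ 0
    nlinarith [hma.1.1, hma.1.2.1, hma.1.2.2, hmb.1.1, hmb.1.2.1, hmb.1.2.2]

-- two strictly-fst-sorted lists with the same members are equal
theorem pv_sorted_eq {α : Type} {R : α → α → Prop}
    (hasym : ∀ a b, R a b → R b a → False) :
    ∀ (l₁ l₂ : List α), l₁.Pairwise R → l₂.Pairwise R → (∀ x, x ∈ l₁ ↔ x ∈ l₂) → l₁ = l₂ := by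
  intro l₁
  induction l₁ with
  | nil =>
    intro l₂ _ _ hm
    cases l₂ with
    | nil => rfl
    | cons b t => exact absurd ((hm b).mpr List.mem_cons_self) (by simp)
  | cons a t ih =>
    intro l₂ h₁ h₂ hm
    cases l₂ with
    | nil => exact absurd ((hm a).mp List.mem_cons_self) (by simp)
    | cons b t₂ =>
      have hab : a = b := by
        rcases List.mem_cons.mp ((hm a).mp List.mem_cons_self) with h | h
        · exact h
        · rcases List.mem_cons.mp ((hm b).mpr List.mem_cons_self) with h' | h'
          · exact h'.symm
          · exact absurd (List.rel_of_pairwise_cons h₂ h)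
              (fun hr => hasym _ _ (List.rel_of_pairwise_cons h₁ h') hr)
      subst hab
      have htm : ∀ x, x ∈ t ↔ x ∈ t₂ := by
        intro x
        constructor
        · intro hx
          have hne : x ≠ a := fun he =>
            hasym a a (he ▸ List.rel_of_pairwise_cons h₁ hx)
              (he ▸ List.rel_of_pairwise_cons h₁ hx)
          rcases List.mem_cons.mp ((hm x).mp (List.mem_cons_of_mem a hx)) with h | h
          · exact absurd h hne
          · exact h
        · intro hx
          have hne : x ≠ a := fun he =>
            hasym a a (he ▸ List.rel_of_pairwise_cons h₂ hx)
              (he ▸ List.rel_of_pairwise_cons h₂ hx)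
          rcases List.mem_cons.mp ((hm x).mpr (List.mem_cons_of_mem a hx)) with h | h
          · exact absurd h hne
          · exact h
      rw [ih t₂ (List.Pairwise.of_cons h₁) (List.Pairwise.of_cons h₂) htm]

-- B's pair list is exactly pvAll
theorem pv_pairs_eq (r : Int) (hr : 0 ≤ r) :
    pvSS r 0 (Int.sqrt r) ++ (pvMM r 0 (Int.sqrt r)).reverse = pvAll r := by
  apply pv_sorted_eq (R := fun p q : Int × Int => p.1 < q.1)
    (fun a b h1 h2 => absurd (lt_trans h1 h2) (lt_irrefl _))
  · rw [List.pairwise_append]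
    refine ⟨pvSS_sorted r 0 (Int.sqrt r), pvMM_sorted r hr, ?_⟩
    intro p hp q hq
    rw [pvSS_mem r hr] at hp
    rw [List.mem_reverse, pvMM_mem r hr] at hq
    nlinarith [hp.1.1, hp.1.2.1, hp.1.2.2, hp.2, hq.1.1, hq.1.2.1, hq.1.2.2, hq.2]
  · exact pvAll_sorted r
  · intro x
    rw [List.mem_append, List.mem_reverse, pvSS_mem r hr, pvMM_mem r hr, pvAll_mem r hr]
    constructor
    · rintro (⟨h, -⟩ | ⟨h, -⟩) <;> exact h
    · intro h
      by_cases hle : x.1 ≤ x.2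
      · exact Or.inl ⟨h, hle⟩
      · exact Or.inr ⟨h, by omega⟩

-- main equivalence ------------------------------------------------------------

theorem fcc_sites_eq (dsqr : Int) (hpre : Pre_fcc_sites dsqr) :
    fcc_sites dsqr = fcc_sites_alt dsqr := by
  by_cases hodd : PySem.Int.mod dsqr 2 = 1
  · unfold fcc_sites fcc_sites_alt
    rw [if_pos hodd, if_pos hodd]
  · have hd : 0 ≤ dsqr := by rcases hpre with h | h; exacts [absurd h hodd, h]
    have hneg : ¬ dsqr < 0 := by omega
    simp only [fcc_sites, fcc_sites_alt, hodd, hneg, if_false]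
    simp only [PySem.List.foldl_append_eq_flatMap, List.nil_append]
    -- split A's outer range at Int.sqrt dsqr + 1
    have hsd := pvSqrtLe dsqr hd
    have hsd2 := pvLtSuccSqrt dsqr hd
    have hs0 := Int.sqrt_nonneg dsqr
    have hceil : Int.sqrt dsqr + 1 ≤ pvCeilSqrt dsqr + 1 := by
      unfold pvCeilSqrt; split_ifs <;> omega
    rw [PySem.List.pyRange_one_append 0 (Int.sqrt dsqr + 1) (pvCeilSqrt dsqr + 1)
        (by omega) hceil, List.flatMap_append]
    have htail : (PySem.List.pyRange (Int.sqrt dsqr + 1) (pvCeilSqrt dsqr + 1) 1).flatMap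
        (fun x =>
          (PySem.List.pyRange 0 ((if dsqr - x * x < 0 then -1 else pvCeilSqrt (dsqr - x * x)) + 1) 1).flatMap
            (fun y =>
              (PySem.List.pyRange
                  (if dsqr - x * x - y * y < 0 then 0 else Int.sqrt (dsqr - x * x - y * y))
                  ((if dsqr - x * x - y * y < 0 then 0 else pvCeilSqrt (dsqr - x * x - y * y)) + 1) 1).foldl
                (fun acc3 z =>
                  if dsqr - x * x - y * y = z * z ∧ PySem.Int.mod (x + y + z) 2 = 0 then
                    acc3 ++ pvYields x y z
                  else acc3) [])) = [] := by
      apply List.flatMap_eq_nil_iff.mpr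
      intro x hx
      rw [PySem.List.mem_pyRange_one] at hx
      have hxx : dsqr - x * x < 0 := by nlinarith [hx.1, hx.2]
      simp [hxx, PySem.List.pyRange_one_eq_nil]
    rw [htail, List.append_nil]
    apply List.flatMap_congr
    intro x hx
    rw [PySem.List.mem_pyRange_one] at hx
    have hx0 : 0 ≤ x := hx.1
    have hxle : x ≤ Int.sqrt dsqr := by omega
    have hm : 0 ≤ dsqr - x * x := by nlinarith
    have hmx : ¬ dsqr - x * x < 0 := by omega
    simp only [hmx, if_false]
    -- B's per-x body: two-pointer result, fold → flatMap over pvAll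
    rw [pvTwoSq_spec (dsqr - x * x) (Int.sqrt (dsqr - x * x) + 1 - 0).toNat 0
        (Int.sqrt (dsqr - x * x)) [] [] rfl le_rfl]
    simp only [List.nil_append]
    rw [pv_foldl_ite_append ((pvSS (dsqr - x*x) 0 (Int.sqrt (dsqr - x*x))) ++
        (pvMM (dsqr - x*x) 0 (Int.sqrt (dsqr - x*x))).reverse)
        (fun p : Int × Int => PySem.Int.mod (x + p.1 + p.2) 2 = 0)
        (fun p : Int × Int => pvEmit x p.1 p.2) []]
    rw [List.nil_append, pv_pairs_eq (dsqr - x * x) hm]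
    -- A's per-x body: trim the y tail, close the z loop, rewrite as flatMap over pvAll
    have hsr := pvSqrtLe (dsqr - x * x) hm
    have hsr2 := pvLtSuccSqrt (dsqr - x * x) hm
    have hsr0 := Int.sqrt_nonneg (dsqr - x * x)
    have hceil2 : Int.sqrt (dsqr - x * x) + 1 ≤ pvCeilSqrt (dsqr - x * x) + 1 := by
      unfold pvCeilSqrt; split_ifs <;> omega
    rw [PySem.List.pyRange_one_append 0 (Int.sqrt (dsqr - x * x) + 1)
        (pvCeilSqrt (dsqr - x * x) + 1) (by omega) hceil2, List.flatMap_append]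
    have htail2 : (PySem.List.pyRange (Int.sqrt (dsqr - x * x) + 1) (pvCeilSqrt (dsqr - x * x) + 1) 1).flatMap
        (fun y =>
          (PySem.List.pyRange
              (if dsqr - x * x - y * y < 0 then 0 else Int.sqrt (dsqr - x * x - y * y))
              ((if dsqr - x * x - y * y < 0 then 0 else pvCeilSqrt (dsqr - x * x - y * y)) + 1) 1).foldl
            (fun acc3 z =>
              if dsqr - x * x - y * y = z * z ∧ PySem.Int.mod (x + y + z) 2 = 0 then
                acc3 ++ pvYields x y z
              else acc3) []) = [] := by
      apply List.flatMap_eq_nil_iff.mpr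
      intro y hy
      rw [PySem.List.mem_pyRange_one] at hy
      have hyy : dsqr - x * x - y * y < 0 := by nlinarith [hy.1, hy.2]
      simp only [hyy, reduceIte]
      rw [PySem.List.pyRange_one_cons (by omega), PySem.List.pyRange_one_eq_nil (by omega)]
      simp only [List.foldl]
      have hc0 : ¬ (dsqr - x * x - y * y = 0 * 0 ∧ PySem.Int.mod (x + y + 0) 2 = 0) := by
        rintro ⟨h0, -⟩; norm_num at h0; omega
      rw [if_neg hc0]
    rw [htail2, List.append_nil]
    -- both sides are now flatMaps over the same data: unfold pvAll on the right
    unfold pvAll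
    rw [pv_flatMap_filterMap]
    apply List.flatMap_congr
    intro y hy
    rw [PySem.List.mem_pyRange_one] at hy
    have hzz : 0 ≤ dsqr - x * x - y * y := by nlinarith [hy.1, hy.2, hsr2]
    have hzzx : ¬ dsqr - x * x - y * y < 0 := by omega
    simp only [hzzx, if_false]
    rw [pvZfold x y (dsqr - x * x - y * y) hzz]
    unfold pvGA
    simp only
    by_cases hsq : dsqr - x * x - y * y =
        Int.sqrt (dsqr - x * x - y * y) * Int.sqrt (dsqr - x * x - y * y)
    · rw [if_pos hsq]
      simp only [Option.map_some, Option.getD_some]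
      by_cases hpar : PySem.Int.mod (x + y + Int.sqrt (dsqr - x * x - y * y)) 2 = 0
      · rw [if_pos ⟨hsq, hpar⟩, if_pos hpar, pvEmit_eq_pvYields]
      · rw [if_neg (by tauto), if_neg hpar]
    · rw [if_neg hsq, if_neg (by tauto)]
      simp

-- ===== VERDICT (by name: the statement is the Claim_ definition above) =====
theorem fcc_sites_spec : Claim_equal_fcc_sites := by
  intro dsqr _ hpre
  exact fcc_sites_eq dsqr hpre
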